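-- pv_equiv track=rewrite | github.com/imattas/Flagr | flagr/units/crypto/vigenere_auto.py | _kasiski_key_lengths
-- ===== SOURCE A (Python) =====
-- def _kasiski_key_lengths(text, max_len=20):
--     """Use Kasiski examination to find likely key lengths."""
--     text = text.upper()
--     distances = []
--
--     # Find repeated trigrams
--     for i in range(len(text) - 2):
--         trigram = text[i:i+3]
--         for j in range(i + 3, len(text) - 2):
--             if text[j:j+3] == trigram:
--                 distances.append(j - i)
--
--     if not distances:
--         return list(range(2, min(max_len + 1, 8)))
--
--     # Find GCD of distances
--     gcds = {}
--     for d in distances: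
--         for kl in range(2, max_len + 1):
--             if d % kl == 0:
--                 gcds[kl] = gcds.get(kl, 0) + 1
--
--     # Sort by frequency
--     sorted_lengths = sorted(gcds.items(), key=lambda x: x[1], reverse=True)
--     return [kl for kl, _ in sorted_lengths[:5]]
-- ===== SOURCE B (Python) =====
-- def _kasiski_key_lengths(text, max_len=20):
--     """Kasiski examination via a trigram position index and memoised divisor
--     lists, instead of a quadratic all-pairs trigram scan plus a divisor loop
--     re-run for every repeated pair."""
--     text = text.upper()
--     n = len(text)
--     pos = {}
--     for i in range(n - 2):
--         pos.setdefault(text[i:i+3], []).append(i)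
--     gcds = {}
--     divs = {}
--     found = False
--     for i in range(n - 2):
--         for j in pos[text[i:i+3]]:
--             if j >= i + 3:
--                 found = True
--                 d = j - i
--                 ks = divs.get(d)
--                 if ks is None:
--                     ks = [kl for kl in range(2, max_len + 1) if d % kl == 0]
--                     divs[d] = ks
--                 for kl in ks:
--                     gcds[kl] = gcds.get(kl, 0) + 1
--     if not found:
--         return list(range(2, min(max_len + 1, 8)))
--     sorted_lengths = sorted(gcds.items(), key=lambda x: x[1], reverse=True)
--     return [kl for kl, _ in sorted_lengths[:5]]
-- ===== Notes on version B (the rewrite author's own statement) =====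
-- stated objective: faster
-- what changed: B builds a dict from each trigram to its position list in one pass and enumerates matching pairs from those lists (removing A's O(n^2) all-pairs trigram comparison), fuses the divisor counting into that scan, and memoises the divisor list per distinct distance so the range(2, max_len+1) trial-division loop runs once per distinct distance instead of once per repeated pair.
import Mathlib
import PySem

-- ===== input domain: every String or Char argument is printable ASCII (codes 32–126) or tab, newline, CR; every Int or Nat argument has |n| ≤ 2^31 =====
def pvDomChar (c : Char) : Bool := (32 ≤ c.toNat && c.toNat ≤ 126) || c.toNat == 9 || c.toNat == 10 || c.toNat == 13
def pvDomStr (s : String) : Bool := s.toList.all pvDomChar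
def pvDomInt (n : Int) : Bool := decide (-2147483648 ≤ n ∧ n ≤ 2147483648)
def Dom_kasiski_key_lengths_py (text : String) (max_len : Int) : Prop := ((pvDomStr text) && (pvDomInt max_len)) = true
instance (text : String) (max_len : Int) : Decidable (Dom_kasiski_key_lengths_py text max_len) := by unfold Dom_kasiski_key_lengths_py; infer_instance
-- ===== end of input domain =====

-- B replaces A's O(n^2) all-pairs trigram scan by a dict from trigram to its position list,
-- fuses the divisor counting into the pair scan and memoises the divisor list per distance;
-- same return value, measurably faster.

-- ===== PORT A =====
-- text[i:i+3] of the upper-cased text, as a list of code points (string equality = toList equality)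
def pvTri (L : List Char) (i : Int) : List Char := PySem.List.slice L (some i) (some (i + 3))

-- the divisor-counting inner loop 'for kl in range(2, max_len+1): if d % kl == 0: gcds[kl] = gcds.get(kl,0)+1'
-- (this exact code appears in both A and B)
def pvDivLoop (max_len : Int) (g : PySem.Dict Int Int) (d : Int) : PySem.Dict Int Int :=
  (PySem.List.pyRange 2 (max_len + 1) 1).foldl
    (fun g kl => if PySem.Int.mod d kl = 0 then g.insert kl (g.getD kl 0 + 1) else g) g

-- 'sorted(gcds.items(), key=lambda x: x[1], reverse=True)' then '[kl for kl, _ in sorted_lengths[:5]]'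
-- (this exact tail appears in both A and B)
def pvTop (gcds : PySem.Dict Int Int) : List Int :=
  (PySem.List.slice (PySem.List.sorted gcds.items (fun x => x.2) true) none (some 5)).map (·.1)

def kasiski_key_lengths_py (text : String) (max_len : Int) : List Int :=
  let L := PySem.Chars.upper text.toList
  let n : Int := L.length
  let distances := (PySem.List.pyRange 0 (n - 2) 1).foldl (fun acc i =>
      let trigram := pvTri L i
      (PySem.List.pyRange (i + 3) (n - 2) 1).foldl (fun acc j =>
        if pvTri L j = trigram then acc ++ [j - i] else acc) acc) []
  if distances = [] then PySem.List.pyRange 2 (min (max_len + 1) 8) 1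
  else pvTop (distances.foldl (pvDivLoop max_len) PySem.Dict.empty)

-- ===== PORT B =====
-- one repeated-trigram pair at distance d: memoised divisor list for d ('divs.get(d)' /
-- '[kl for kl in range(2, max_len+1) if d % kl == 0]'), then 'gcds[kl] = gcds.get(kl,0)+1'
-- for each kl in it, and 'found = True'
def pvPairStep (max_len : Int)
    (st : PySem.Dict Int (List Int) × PySem.Dict Int Int × Bool) (d : Int) :
    PySem.Dict Int (List Int) × PySem.Dict Int Int × Bool :=
  match st.1.get? d with
  | some ks => (st.1, ks.foldl (fun g kl => g.insert kl (g.getD kl 0 + 1)) st.2.1, true)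
  | none =>
      let ks := (PySem.List.pyRange 2 (max_len + 1) 1).foldl
        (fun acc kl => if PySem.Int.mod d kl = 0 then acc ++ [kl] else acc) []
      (st.1.insert d ks, ks.foldl (fun g kl => g.insert kl (g.getD kl 0 + 1)) st.2.1, true)

def kasiski_key_lengths_py_alt (text : String) (max_len : Int) : List Int :=
  let L := PySem.Chars.upper text.toList
  let n : Int := L.length
  -- pos.setdefault(text[i:i+3], []).append(i)  ==  pos[t] = pos.get(t, []) + [i]  == Dict.modify
  let pos := (PySem.List.pyRange 0 (n - 2) 1).foldl
      (fun d i => d.modify (pvTri L i) [] (· ++ [i])) PySem.Dict.empty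
  -- state (divs, gcds, found); 'pos[text[i:i+3]]' never raises (i itself is in the list), so getD with [] is exact here
  let st := (PySem.List.pyRange 0 (n - 2) 1).foldl (fun st i =>
      (pos.getD (pvTri L i) []).foldl (fun st j =>
        if i + 3 ≤ j then pvPairStep max_len st (j - i) else st) st)
    (((PySem.Dict.empty : PySem.Dict Int (List Int)), (PySem.Dict.empty : PySem.Dict Int Int), false))
  if st.2.2 = false then PySem.List.pyRange 2 (min (max_len + 1) 8) 1
  else pvTop st.2.1

-- ===== PRECONDITION & SPEC =====
def Spec_kasiski_key_lengths_py (text : String) (max_len : Int) (out : List Int) : Prop := out = kasiski_key_lengths_py_alt text max_len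
instance (text : String) (max_len : Int) (out : List Int) : Decidable (Spec_kasiski_key_lengths_py text max_len out) := by unfold Spec_kasiski_key_lengths_py; infer_instance

-- ===== CLAIM (what is proved, stated in full; the proofs are below) =====
def Claim_equal_kasiski_key_lengths_py : Prop := ∀ (text : String) (max_len : Int), Dom_kasiski_key_lengths_py text max_len → Spec_kasiski_key_lengths_py text max_len (kasiski_key_lengths_py text max_len)



-- ===== LEMMAS AND PROOFS =====

-- the per-i list of distances A appends: matching j in range(i+3, m) mapped to j - i
def pvDs (L : List Char) (m i : Int) : List Int :=
  ((PySem.List.pyRange (i + 3) m 1).filter (fun j => decide (pvTri L j = pvTri L i))).map (fun j => j - i)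

-- the position dict B builds maps t to exactly the i in range with trigram t
lemma pv_pos_getD (L : List Char) (m : Int) (t : List Char) :
    ((PySem.List.pyRange 0 m 1).foldl (fun d i => d.modify (pvTri L i) [] (· ++ [i])) PySem.Dict.empty).getD t []
      = (PySem.List.pyRange 0 m 1).filter (fun i => pvTri L i == t) := by
  have h : (PySem.List.pyRange 0 m 1).foldl (fun d i => d.modify (pvTri L i) [] (· ++ [i])) PySem.Dict.empty
      = ((PySem.List.pyRange 0 m 1).map (fun i => (pvTri L i, i))).foldl
          (fun d p => d.modify p.1 [] (· ++ [p.2])) PySem.Dict.empty := by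
    rw [List.foldl_map]
  rw [h, PySem.Dict.getD_foldl_modify_append]
  simp [List.filter_map, Function.comp_def]

-- a guarded fold over a list is a fold over the filtered, mapped list
lemma pv_guard_fold {s : Type} (js : List Int) (P : Int → Prop) [DecidablePred P]
    (f : Int → Int) (g : s → Int → s) (st : s) :
    js.foldl (fun st j => if P j then g st (f j) else st) st
      = ((js.filter (fun j => decide (P j))).map f).foldl g st := by
  induction js generalizing st with
  | nil => rfl
  | cons j t ih => by_cases h : P j <;> simp [h, ih]

-- filtering range(0, m) by i+3 ≤ j is filtering range(i+3, m)
lemma pv_range_split (m i : Int) (hi : 0 ≤ i) (q : Int → Bool) :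
    (PySem.List.pyRange 0 m 1).filter (fun j => decide (i + 3 ≤ j) && q j)
      = (PySem.List.pyRange (i + 3) m 1).filter q := by
  by_cases h : i + 3 ≤ m
  · rw [PySem.List.pyRange_one_append 0 (i + 3) m (by omega) h, List.filter_append]
    have h1 : (PySem.List.pyRange 0 (i + 3) 1).filter (fun j => decide (i + 3 ≤ j) && q j) = [] := by
      rw [List.filter_eq_nil_iff]
      intro a ha
      rw [PySem.List.mem_pyRange_one] at ha
      simp only [Bool.and_eq_true, decide_eq_true_eq, not_and]
      intro h'; omega
    rw [h1, List.nil_append]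
    apply List.filter_congr
    intro a ha
    rw [PySem.List.mem_pyRange_one] at ha
    simp [decide_eq_true (show i + 3 ≤ a by omega)]
  · have h2 : PySem.List.pyRange (i + 3) m 1 = [] := PySem.List.pyRange_one_eq_nil (by omega)
    rw [h2, List.filter_nil, List.filter_eq_nil_iff]
    intro a ha
    rw [PySem.List.mem_pyRange_one] at ha
    simp only [Bool.and_eq_true, decide_eq_true_eq, not_and]
    intro h'; omega

-- B's inner loop over the position list is a fold over A's per-i distance list
lemma pv_innerB {s : Type} (L : List Char) (m i : Int) (hi : 0 ≤ i)
    (g : s → Int → s) (st : s) :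
    ((PySem.List.pyRange 0 m 1).filter (fun x => pvTri L x == pvTri L i)).foldl
        (fun st j => if i + 3 ≤ j then g st (j - i) else st) st
      = (pvDs L m i).foldl g st := by
  rw [pv_guard_fold ((PySem.List.pyRange 0 m 1).filter (fun x => pvTri L x == pvTri L i))
    (fun j => i + 3 ≤ j) (fun j => j - i) g st]
  congr 1
  unfold pvDs
  rw [List.filter_filter,
    show (fun a => decide (i + 3 ≤ a) && (pvTri L a == pvTri L i))
        = (fun a => decide (i + 3 ≤ a) && decide (pvTri L a = pvTri L i)) from by
      funext x; rw [Bool.beq_eq_decide_eq],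
    pv_range_split m i hi (fun j => decide (pvTri L j = pvTri L i))]

-- A's divisor loop is the fold of the bump over the list of divisors of d in 2..max_len
lemma pv_divloop_eq (ml g d) :
    pvDivLoop ml g d
      = ((PySem.List.pyRange 2 (ml + 1) 1).filter
            (fun kl => decide (PySem.Int.mod d kl = 0))).foldl
          (fun g kl => g.insert kl (g.getD kl 0 + 1)) g := by
  unfold pvDivLoop
  rw [pv_guard_fold (PySem.List.pyRange 2 (ml + 1) 1) (fun kl => PySem.Int.mod d kl = 0)
    (fun kl => kl) (fun g kl => g.insert kl (g.getD kl 0 + 1)) g, List.map_id']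

-- the memo dict only ever stores the recomputed divisor list
def pvInv (ml : Int) (dv : PySem.Dict Int (List Int)) : Prop :=
  ∀ d ks, dv.get? d = some ks →
    ks = (PySem.List.pyRange 2 (ml + 1) 1).filter (fun kl => decide (PySem.Int.mod d kl = 0))

-- one pvPairStep: gcds gains pvDivLoop, found becomes true, the invariant is kept
lemma pv_step (ml : Int) (dv : PySem.Dict Int (List Int)) (g : PySem.Dict Int Int)
    (b : Bool) (d : Int) (h : pvInv ml dv) :
    (pvPairStep ml (dv, g, b) d).2 = (pvDivLoop ml g d, true)
      ∧ pvInv ml (pvPairStep ml (dv, g, b) d).1 := by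
  cases h1 : dv.get? d with
  | some ks =>
      have hks := h d ks h1
      refine ⟨?_, ?_⟩
      · simp only [pvPairStep, h1, hks, pv_divloop_eq]
      · simpa only [pvPairStep, h1] using h
  | none =>
      have hks : ((PySem.List.pyRange 2 (ml + 1) 1).foldl
            (fun acc kl => if PySem.Int.mod d kl = 0 then acc ++ [kl] else acc) [])
          = (PySem.List.pyRange 2 (ml + 1) 1).filter
              (fun kl => decide (PySem.Int.mod d kl = 0)) := by
        rw [PySem.List.foldl_append_ite_eq_filter]
        simp
      refine ⟨?_, ?_⟩
      · simp only [pvPairStep, h1, hks, pv_divloop_eq]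
      · simp only [pvPairStep, h1]
        intro d' ks' hd'
        rw [PySem.Dict.get?_insert] at hd'
        by_cases hdd : d' = d
        · subst hdd
          rw [if_pos rfl] at hd'
          injection hd' with hd''
          rw [← hd'', hks]
        · rw [if_neg hdd] at hd'
          exact h d' ks' hd'

-- folding pvPairStep over the distance list: gcds is A's fold, found records non-emptiness
lemma pv_memo_fold (ml : Int) (ds : List Int) :
    ∀ (dv : PySem.Dict Int (List Int)) (g : PySem.Dict Int Int) (b : Bool), pvInv ml dv →
      (ds.foldl (pvPairStep ml) (dv, g, b)).2 = (ds.foldl (pvDivLoop ml) g, b || !ds.isEmpty) := by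
  induction ds with
  | nil => intro dv g b _; simp
  | cons d t ih =>
      intro dv g b h
      obtain ⟨h2, hinv⟩ := pv_step ml dv g b d h
      rcases e : pvPairStep ml (dv, g, b) d with ⟨dv', g', b'⟩
      rw [e] at h2 hinv
      obtain ⟨hg, hb⟩ := Prod.mk.injEq .. ▸ h2
      subst hg hb
      rw [List.foldl_cons, e, ih dv' (pvDivLoop ml g d) true hinv]
      simp

-- ===== VERDICT (by name: the statement is the Claim_ definition above) =====
theorem kasiski_key_lengths_py_spec : Claim_equal_kasiski_key_lengths_py := by
  intro text max_len _
  unfold Spec_kasiski_key_lengths_py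
  simp only [kasiski_key_lengths_py, kasiski_key_lengths_py_alt]
  set L := PySem.Chars.upper text.toList with hL
  set m := (L.length : Int) - 2 with hm
  -- A's distance list is the flatMap of the per-i lists
  have hA : (PySem.List.pyRange 0 m 1).foldl (fun acc i =>
        (PySem.List.pyRange (i + 3) m 1).foldl
          (fun acc j => if pvTri L j = pvTri L i then acc ++ [j - i] else acc) acc) ([] : List Int)
      = (PySem.List.pyRange 0 m 1).flatMap (pvDs L m) := by
    refine (PySem.List.foldl_congr_mem (PySem.List.pyRange 0 m 1) _
      (fun acc i => acc ++ pvDs L m i) ([] : List Int) ?_).trans ?_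
    · intro acc i _
      rw [PySem.List.foldl_append_ite (fun j => pvTri L j = pvTri L i) (fun j => j - i)]
      rfl
    · simpa using PySem.List.foldl_append_eq_flatMap (pvDs L m) (PySem.List.pyRange 0 m 1) []
  -- B's fused loop computes the same fold over that flatMap
  have hB : (PySem.List.pyRange 0 m 1).foldl (fun st i =>
        (((PySem.List.pyRange 0 m 1).foldl (fun d i => d.modify (pvTri L i) [] (· ++ [i]))
            PySem.Dict.empty).getD (pvTri L i) []).foldl
          (fun st j => if i + 3 ≤ j then pvPairStep max_len st (j - i) else st) st)
        (((PySem.Dict.empty : PySem.Dict Int (List Int)),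
          (PySem.Dict.empty : PySem.Dict Int Int), false))
      = ((PySem.List.pyRange 0 m 1).flatMap (pvDs L m)).foldl (pvPairStep max_len)
          ((PySem.Dict.empty : PySem.Dict Int (List Int)),
            (PySem.Dict.empty : PySem.Dict Int Int), false) := by
    refine (PySem.List.foldl_congr_mem (PySem.List.pyRange 0 m 1) _
      (fun st i => (pvDs L m i).foldl (pvPairStep max_len) st)
      (((PySem.Dict.empty : PySem.Dict Int (List Int)),
        (PySem.Dict.empty : PySem.Dict Int Int), false)) ?_).trans ?_
    · intro st i hi
      rw [PySem.List.mem_pyRange_one] at hi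
      rw [pv_pos_getD L m (pvTri L i), pv_innerB L m i hi.1 (pvPairStep max_len) st]
    · rw [← List.foldl_flatMap]
  have hMemo := pv_memo_fold max_len ((PySem.List.pyRange 0 m 1).flatMap (pvDs L m))
    PySem.Dict.empty PySem.Dict.empty false
    (by intro d ks hd; rw [PySem.Dict.get?_empty] at hd; cases hd)
  rw [hA, hB, hMemo]
  by_cases hd : (PySem.List.pyRange 0 m 1).flatMap (pvDs L m) = [] <;> simp [hd]
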